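-- pv_equiv track=rewrite | github.com/slegare2/evolutionary_algorithm | ancestry.py | find_binding_rules
-- ===== SOURCE A (Python) =====
-- def find_binding_rules(model_file):
--     """ Read input Kappa file and find the range of the binding rules. """
--
--     bind_start = 0
--     bind_end = 0
--     for i in range(len(model_file)):
--         line = model_file[i]
--         if "// Binary binding rules." in line:
--             bind_start = i + 1
--         if "// Unbinding rules." in line:
--             bind_end = i - 1
--
--     return bind_start, bind_end
-- ===== SOURCE B (Python) =====
-- def find_binding_rules(model_file):
--     """ Read input Kappa file and find the range of the binding rules. """
--     n = len(model_file)
--     bind_start = next((i + 1 for i in reversed(range(n))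
--                        if "// Binary binding rules." in model_file[i]), 0)
--     bind_end = next((i - 1 for i in reversed(range(n))
--                      if "// Unbinding rules." in model_file[i]), 0)
--     return bind_start, bind_end
-- ===== Notes on version B (the rewrite author's own statement) =====
-- stated objective: simpler
-- what changed: Replaces A's single forward loop that overwrites both bind_start and bind_end with two independent early-stopping reversed searches (next over reversed(range(n)) with default 0), computing each return value separately.
import Mathlib
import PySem

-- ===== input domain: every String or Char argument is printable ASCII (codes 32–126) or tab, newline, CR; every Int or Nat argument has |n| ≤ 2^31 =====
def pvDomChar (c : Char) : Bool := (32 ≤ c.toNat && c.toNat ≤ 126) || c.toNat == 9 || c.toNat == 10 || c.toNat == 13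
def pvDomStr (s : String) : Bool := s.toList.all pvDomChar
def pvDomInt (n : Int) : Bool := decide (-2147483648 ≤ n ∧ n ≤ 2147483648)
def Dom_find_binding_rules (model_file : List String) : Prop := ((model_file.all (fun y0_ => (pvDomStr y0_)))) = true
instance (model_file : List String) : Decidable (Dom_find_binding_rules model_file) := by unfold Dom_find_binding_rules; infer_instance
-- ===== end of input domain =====

-- B replaces A's single overwriting forward loop by two independent early-stopping
-- reversed searches (simpler decomposition; same O(n) cost).

-- ===== PORT A =====
-- one forward pass over the indices, overwriting bind_start/bind_end at each match
def find_binding_rules (model_file : List String) : Int × Int :=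
  (PySem.List.pyRange 0 (PySem.List.len model_file) 1).foldl
    (fun st i =>
      let line := PySem.List.pyGetD model_file i ""
      let st := if PySem.Str.isIn "// Binary binding rules." line then (i + 1, st.2) else st
      let st := if PySem.Str.isIn "// Unbinding rules." line then (st.1, i - 1) else st
      st)
    (0, 0)

-- ===== PORT B =====
-- two independent searches from the end (reversed(range(n)) with next(..., 0))
def find_binding_rules_alt (model_file : List String) : Int × Int :=
  let n := PySem.List.len model_file
  let bind_start :=
    (((PySem.List.pyRange 0 n 1).reverse.find?
        (fun i => PySem.Str.isIn "// Binary binding rules." (PySem.List.pyGetD model_file i ""))).map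
      (fun i => i + 1)).getD 0
  let bind_end :=
    (((PySem.List.pyRange 0 n 1).reverse.find?
        (fun i => PySem.Str.isIn "// Unbinding rules." (PySem.List.pyGetD model_file i ""))).map
      (fun i => i - 1)).getD 0
  (bind_start, bind_end)

-- ===== PRECONDITION & SPEC =====
def Spec_find_binding_rules (model_file : List String) (out : Int × Int) : Prop := out = find_binding_rules_alt model_file
instance (model_file : List String) (out : Int × Int) : Decidable (Spec_find_binding_rules model_file out) := by unfold Spec_find_binding_rules; infer_instance

-- ===== CLAIM (what is proved, stated in full; the proofs are below) =====
def Claim_equal_find_binding_rules : Prop := ∀ (model_file : List String), Dom_find_binding_rules model_file → Spec_find_binding_rules model_file (find_binding_rules model_file)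

-- ===== LEMMAS AND PROOFS =====

-- a "last match wins" overwrite-fold equals a find? over the reversed list
theorem lastUpd {α β : Type} (p : α → Bool) (g : α → β) :
    ∀ (l : List α) (init : β),
      l.foldl (fun s i => if p i then g i else s) init =
        ((l.reverse.find? p).map g).getD init := by
  intro l
  induction l with
  | nil => intro init; simp
  | cons a l ih =>
    intro init
    simp only [List.foldl_cons, List.reverse_cons, List.find?_append, ih]
    cases h : l.reverse.find? p with
    | some i => simp
    | none =>
      by_cases hp : p a = true <;> simp [List.find?, hp]

theorem find_binding_rules_eq_components (model_file : List String) :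
    find_binding_rules model_file =
      ((PySem.List.pyRange 0 (PySem.List.len model_file) 1).foldl
         (fun a i => if PySem.Str.isIn "// Binary binding rules." (PySem.List.pyGetD model_file i "") then i + 1 else a) 0,
       (PySem.List.pyRange 0 (PySem.List.len model_file) 1).foldl
         (fun b i => if PySem.Str.isIn "// Unbinding rules." (PySem.List.pyGetD model_file i "") then i - 1 else b) 0) := by
  unfold find_binding_rules
  rw [show (fun (st : Int × Int) (i : Int) =>
        let line := PySem.List.pyGetD model_file i ""
        let st := if PySem.Str.isIn "// Binary binding rules." line then (i + 1, st.2) else st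
        let st := if PySem.Str.isIn "// Unbinding rules." line then (st.1, i - 1) else st
        st)
      = (fun (st : Int × Int) (i : Int) =>
          ((fun a i => if PySem.Str.isIn "// Binary binding rules." (PySem.List.pyGetD model_file i "") then i + 1 else a) st.1 i,
           (fun b i => if PySem.Str.isIn "// Unbinding rules." (PySem.List.pyGetD model_file i "") then i - 1 else b) st.2 i))
      from by funext st i; simp only []; split_ifs <;> rfl]
  exact PySem.List.foldl_prod_mk
    (fun (a : Int) i => if PySem.Str.isIn "// Binary binding rules." (PySem.List.pyGetD model_file i "") then i + 1 else a)
    (fun (b : Int) i => if PySem.Str.isIn "// Unbinding rules." (PySem.List.pyGetD model_file i "") then i - 1 else b)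
    _ 0 0

-- ===== VERDICT (by name: the statement is the Claim_ definition above) =====
theorem find_binding_rules_spec : Claim_equal_find_binding_rules := by
  intro model_file _
  unfold Spec_find_binding_rules
  rw [find_binding_rules_eq_components, lastUpd, lastUpd]
  rfl
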